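-- pv_equiv track=rewrite | github.com/wavenumber-eng/altium_monkey | src/py/altium_monkey/altium_netlist_common.py | _evaluate_altium_expression
-- ===== SOURCE A (Python) =====
-- def _evaluate_altium_expression(expr: str, params: dict[str, str]) -> str:
--     """Evaluate a simple Altium parameter expression."""
--
--     result_parts = []
--     i = 0
--     expr_len = len(expr)
--
--     while i < expr_len:
--         ch = expr[i]
--         if ch in " \t":
--             i += 1
--             continue
--         if ch == "+":
--             i += 1
--             continue
--         if ch == "'":
--             end = expr.find("'", i + 1)
--             if end == -1:
--                 result_parts.append(expr[i + 1:])
--                 break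
--             result_parts.append(expr[i + 1:end])
--             i = end + 1
--             continue
--         if ch.isalpha() or ch == "_":
--             j = i
--             while j < expr_len and (expr[j].isalnum() or expr[j] == "_"):
--                 j += 1
--             ident = expr[i:j]
--             ident_lower = ident.lower()
--             found = False
--             for key, value in params.items():
--                 if key.lower() == ident_lower:
--                     result_parts.append(value)
--                     found = True
--                     break
--             if not found:
--                 result_parts.append("")
--             i = j
--             continue
--         i += 1
--
--     return "".join(result_parts)
-- ===== SOURCE B (Python) =====
-- def _take_while(pred, s):
--     """Split s into (longest prefix whose chars satisfy pred, the rest)."""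
--     for n, c in enumerate(s):
--         if not pred(c):
--             return s[:n], s[n:]
--     return s, ""
--
--
-- def _evaluate_altium_expression(expr: str, params: dict[str, str]) -> str:
--     """Evaluate a simple Altium parameter expression."""
--
--     lookup = {}
--     for key, value in params.items():
--         lk = key.lower()
--         if lk not in lookup:
--             lookup[lk] = value
--
--     parts = []
--     rest = expr
--     while rest:
--         ch = rest[0]
--         if ch == "'":
--             body, sep, after = rest[1:].partition("'")
--             parts.append(body)
--             if not sep:
--                 break
--             rest = after
--         elif ch.isalpha() or ch == "_":
--             ident, rest = _take_while(lambda c: c.isalnum() or c == "_", rest)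
--             parts.append(lookup.get(ident.lower(), ""))
--         else:
--             rest = rest[1:]
--     return "".join(parts)
-- ===== Notes on version B (the rewrite author's own statement) =====
-- stated objective: alternative
-- what changed: B tokenizes by consuming the remaining suffix with partition/take-while splits and looks identifiers up in a lowercase-keyed dict built once (first occurrence wins), instead of A's manual index pointer with find() and a per-identifier linear scan over params.
import Mathlib
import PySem

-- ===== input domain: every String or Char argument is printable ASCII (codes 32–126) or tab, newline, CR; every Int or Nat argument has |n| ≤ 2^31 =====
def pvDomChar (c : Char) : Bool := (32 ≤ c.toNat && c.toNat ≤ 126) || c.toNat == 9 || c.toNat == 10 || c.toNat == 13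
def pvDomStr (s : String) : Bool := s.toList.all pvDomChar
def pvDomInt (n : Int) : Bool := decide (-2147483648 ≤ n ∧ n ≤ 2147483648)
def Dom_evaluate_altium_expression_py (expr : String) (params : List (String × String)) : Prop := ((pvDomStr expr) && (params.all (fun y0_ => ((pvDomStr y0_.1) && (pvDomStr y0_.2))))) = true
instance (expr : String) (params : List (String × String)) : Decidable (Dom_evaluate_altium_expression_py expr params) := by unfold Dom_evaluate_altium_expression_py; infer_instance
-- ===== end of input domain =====

-- B re-implements A by consuming the remaining suffix with partition/take-while splits and a
-- lowercase-keyed dict built once (first occurrence wins), instead of A's manual index pointer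
-- with find() and a per-identifier scan over params; objective: alternative structure.

-- ===== PORT A =====

-- A's identifier-character test: expr[j].isalnum() or expr[j] == "_"
def pvIdentP (c : Char) : Bool := PySem.Chars.isalnum c || c == '_'

-- A's inner while loop: j = i; while j < expr_len and (expr[j].isalnum() or expr[j] == "_"): j += 1
def pvIdentEnd (cs : List Char) (j : Nat) : Nat :=
  if h : j < cs.length then
    if pvIdentP cs[j] then pvIdentEnd cs (j + 1) else j
  else j
termination_by cs.length - j
decreasing_by omega

-- A's params scan: for key, value in params.items(): if key.lower() == ident_lower: … (else "")
def pvFindParam : List (String × String) → List Char → List Char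
  | [], _ => []
  | (k, v) :: rest, il =>
    if PySem.Chars.lower k.toList == il then v.toList else pvFindParam rest il

-- termination helper for pvLoopA's quote branch: a successful find starts at or after i+1
theorem pvFindFrom_ge (cs : List Char) (i : Nat) (h : i < cs.length)
    (hne : PySem.Chars.findFrom cs ['\''] ((i : Int) + 1) ≠ -1) :
    (i : Int) + 1 ≤ PySem.Chars.findFrom cs ['\''] ((i : Int) + 1) := by
  have hk : i + 1 ≤ cs.length := h
  have hcast : ((i : Int) + 1) = ((i + 1 : Nat) : Int) := by push_cast; ring
  have hge := PySem.Chars.neg_one_le_find (cs.drop (i + 1)) ['\'']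
  rw [hcast] at hne ⊢
  rw [PySem.Chars.findFrom_natCast cs ['\''] (i + 1) hk] at hne ⊢
  by_cases hf : PySem.Chars.find (cs.drop (i + 1)) ['\''] = -1
  · simp [hf] at hne
  · simp only [hf, if_false]
    omega

-- termination helper for pvLoopA's identifier branch
theorem pvIdentEnd_ge (cs : List Char) (j : Nat) : j ≤ pvIdentEnd cs j := by
  unfold pvIdentEnd
  split
  · split
    · have := pvIdentEnd_ge cs (j + 1); omega
    · exact le_refl _
  · exact le_refl _
termination_by cs.length - j
decreasing_by omega

theorem pvIdentEnd_gt (cs : List Char) (i : Nat) (h : i < cs.length)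
    (hp : pvIdentP cs[i] = true) : i < pvIdentEnd cs i := by
  have h1 : pvIdentEnd cs i = pvIdentEnd cs (i + 1) := by
    rw [pvIdentEnd]; simp [h, hp]
  have := pvIdentEnd_ge cs (i + 1)
  omega

-- isalpha (or '_') characters are identifier characters (isalnum = isalpha || isdigit)
theorem pvIdentP_of_start (c : Char) (h : (PySem.Chars.isalpha c || c == '_') = true) :
    pvIdentP c = true := by
  unfold pvIdentP PySem.Chars.isalnum
  rcases Bool.or_eq_true_iff.mp h with h' | h' <;> simp [h']

-- A's main while loop over the index i, accumulating result_parts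
def pvLoopA (cs : List Char) (params : List (String × String)) (i : Nat)
    (acc : List (List Char)) : List (List Char) :=
  if h : i < cs.length then
    let ch := cs[i]
    if ch == ' ' || ch == '\t' then pvLoopA cs params (i + 1) acc
    else if ch == '+' then pvLoopA cs params (i + 1) acc
    else if ch == '\'' then
      if he : PySem.Chars.findFrom cs ['\''] ((i : Int) + 1) = -1 then
        acc ++ [PySem.List.slice cs (some ((i : Int) + 1)) none]
      else
        pvLoopA cs params ((PySem.Chars.findFrom cs ['\''] ((i : Int) + 1)).toNat + 1)
          (acc ++ [PySem.List.slice cs (some ((i : Int) + 1))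
            (some (PySem.Chars.findFrom cs ['\''] ((i : Int) + 1)))])
    else if halpha : (PySem.Chars.isalpha ch || ch == '_') = true then
      pvLoopA cs params (pvIdentEnd cs i)
        (acc ++ [pvFindParam params (PySem.Chars.lower
          (PySem.List.slice cs (some (i : Int)) (some ((pvIdentEnd cs i : Nat) : Int))))])
    else pvLoopA cs params (i + 1) acc
  else acc
termination_by cs.length - i
decreasing_by
  · omega
  · omega
  · have := pvFindFrom_ge cs i h he; omega
  · have := pvIdentEnd_gt cs i h (pvIdentP_of_start _ halpha); omega
  · omega

def evaluate_altium_expression_py (expr : String) (params : List (String × String)) : String :=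
  String.ofList (PySem.Chars.join [] (pvLoopA expr.toList params 0 []))

-- ===== PORT B =====

-- B's _take_while helper: longest prefix satisfying pred, and the rest
def pvTakeWhileSplit (p : Char → Bool) : List Char → List Char × List Char
  | [] => ([], [])
  | c :: tl =>
    if p c then
      let r := pvTakeWhileSplit p tl
      (c :: r.1, r.2)
    else ([], c :: tl)

-- str.partition("'") on the suffix after the opening quote (single-character separator)
def pvPartitionQuote : List Char → List Char × Bool × List Char
  | [] => ([], false, [])
  | c :: tl =>
    if c == '\'' then ([], true, tl)
    else
      let r := pvPartitionQuote tl
      (c :: r.1, r.2.1, r.2.2)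

-- termination helpers for pvLoopB
theorem pvPartitionQuote_len (l : List Char) : (pvPartitionQuote l).2.2.length ≤ l.length := by
  induction l with
  | nil => simp [pvPartitionQuote]
  | cons c tl ih =>
    by_cases hc : c == '\'' <;> simp [pvPartitionQuote, hc] <;> omega

theorem pvTakeWhileSplit_len (p : Char → Bool) (l : List Char) :
    (pvTakeWhileSplit p l).2.length ≤ l.length := by
  induction l with
  | nil => simp [pvTakeWhileSplit]
  | cons c tl ih =>
    by_cases hc : p c <;> simp [pvTakeWhileSplit, hc] <;> omega

-- B's lookup-building loop: lowercase key, first occurrence wins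
def pvBuildLookup (params : List (String × String)) : PySem.Dict (List Char) (List Char) :=
  params.foldl
    (fun d kv =>
      if d.contains (PySem.Chars.lower kv.1.toList) then d
      else d.insert (PySem.Chars.lower kv.1.toList) kv.2.toList)
    PySem.Dict.empty

-- B's main while loop over the remaining suffix, accumulating parts
def pvLoopB (lookup : PySem.Dict (List Char) (List Char)) (rest : List Char)
    (parts : List (List Char)) : List (List Char) :=
  match rest with
  | [] => parts
  | ch :: tl =>
    if ch == '\'' then
      let r := pvPartitionQuote tl
      if r.2.1 then pvLoopB lookup r.2.2 (parts ++ [r.1]) else parts ++ [r.1]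
    else if halpha : (PySem.Chars.isalpha ch || ch == '_') = true then
      let r := pvTakeWhileSplit pvIdentP (ch :: tl)
      pvLoopB lookup r.2 (parts ++ [lookup.getD (PySem.Chars.lower r.1) []])
    else pvLoopB lookup tl parts
termination_by rest.length
decreasing_by
  · have := pvPartitionQuote_len tl; simp only [List.length_cons]; omega
  · have hp : pvIdentP ch = true := pvIdentP_of_start ch halpha
    have := pvTakeWhileSplit_len pvIdentP tl
    simp only [pvTakeWhileSplit, hp, if_pos]
    simp only [List.length_cons]
    omega
  · simp

def evaluate_altium_expression_py_alt (expr : String) (params : List (String × String)) : String :=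
  String.ofList (PySem.Chars.join [] (pvLoopB (pvBuildLookup params) expr.toList []))

-- ===== PRECONDITION & SPEC =====
def Spec_evaluate_altium_expression_py (expr : String) (params : List (String × String)) (out : String) : Prop := out = evaluate_altium_expression_py_alt expr params
instance (expr : String) (params : List (String × String)) (out : String) : Decidable (Spec_evaluate_altium_expression_py expr params out) := by unfold Spec_evaluate_altium_expression_py; infer_instance

-- ===== CLAIM (what is proved, stated in full; the proofs are below) =====
def Claim_equal_evaluate_altium_expression_py : Prop := ∀ (expr : String) (params : List (String × String)), Dom_evaluate_altium_expression_py expr params → Spec_evaluate_altium_expression_py expr params (evaluate_altium_expression_py expr params)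

-- ===== LEMMAS AND PROOFS =====

theorem pvTWS_eq (p : Char → Bool) (l : List Char) :
    pvTakeWhileSplit p l = (l.takeWhile p, l.dropWhile p) := by
  induction l with
  | nil => simp [pvTakeWhileSplit]
  | cons c tl ih =>
    by_cases hc : p c <;>
      simp [pvTakeWhileSplit, hc, List.takeWhile_cons, List.dropWhile_cons, ih]

theorem pvPartition_found (l : List Char) (h : (pvPartitionQuote l).2.1 = true) :
    l = (pvPartitionQuote l).1 ++ '\'' :: (pvPartitionQuote l).2.2 ∧
      '\'' ∉ (pvPartitionQuote l).1 := by
  induction l with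
  | nil => simp [pvPartitionQuote] at h
  | cons c tl ih =>
    by_cases hc : c == '\''
    · have : c = '\'' := by simpa using hc
      subst this
      simp [pvPartitionQuote]
    · simp only [pvPartitionQuote, hc, if_false] at h ⊢
      have hc' : c ≠ '\'' := by simpa using hc
      obtain ⟨h1, h2⟩ := ih h
      refine ⟨by simpa using congrArg (c :: ·) h1, ?_⟩
      simp [hc'.symm, h2]

theorem pvPartition_notfound (l : List Char) (h : (pvPartitionQuote l).2.1 = false) :
    (pvPartitionQuote l).1 = l ∧ '\'' ∉ l ∧ (pvPartitionQuote l).2.2 = [] := by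
  induction l with
  | nil => simp [pvPartitionQuote]
  | cons c tl ih =>
    by_cases hc : c == '\''
    · have : c = '\'' := by simpa using hc
      subst this
      simp [pvPartitionQuote] at h
    · simp only [pvPartitionQuote, hc, if_false] at h ⊢
      have hc' : c ≠ '\'' := by simpa using hc
      obtain ⟨h1, h2, h3⟩ := ih h
      exact ⟨by simp [h1], by simp [hc'.symm, h2], h3⟩

theorem pvFind_of_split (b r : List Char) (hb : '\'' ∉ b) :
    PySem.Chars.find (b ++ '\'' :: r) ['\''] = (b.length : Int) := by
  have hinf : ['\''] <:+: (b ++ '\'' :: r) := ⟨b, r, by simp⟩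
  have h0 : 0 ≤ PySem.Chars.find (b ++ '\'' :: r) ['\''] :=
    (PySem.Chars.find_nonneg_iff _ _).mpr hinf
  obtain ⟨hpre, hmin⟩ := PySem.Chars.find_spec h0
  set n := (PySem.Chars.find (b ++ '\'' :: r) ['\'']).toNat with hn
  have hnb : ¬ b.length < n := by
    intro hlt
    exact hmin b.length hlt ⟨r, by simp⟩
  have hbn : ¬ n < b.length := by
    intro hlt
    obtain ⟨t, ht⟩ := hpre
    have hget : (b ++ '\'' :: r)[n]? = some '\'' := by
      rw [← List.head?_drop, ← ht]
      rfl
    have : b[n]? = some '\'' := by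
      rwa [List.getElem?_append_left hlt] at hget
    exact hb (List.mem_of_getElem? this)
  have : n = b.length := by omega
  omega

theorem pvFind_of_not_mem (l : List Char) (h : '\'' ∉ l) :
    PySem.Chars.find l ['\''] = -1 := by
  apply (PySem.Chars.find_eq_neg_one_iff _ _).mpr
  intro hinf
  exact h (List.singleton_sublist.mp hinf.sublist)

theorem pvIdentEnd_eq (cs : List Char) :
    ∀ n j, cs.length - j ≤ n → j ≤ cs.length →
      pvIdentEnd cs j = j + ((cs.drop j).takeWhile pvIdentP).length := by
  intro n
  induction n with
  | zero =>
    intro j hn hj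
    have hj' : j = cs.length := by omega
    rw [pvIdentEnd]
    simp [hj']
  | succ n ih =>
    intro j hn hj
    by_cases h : j < cs.length
    · have hdrop : cs.drop j = cs[j] :: cs.drop (j + 1) := List.drop_eq_getElem_cons h
      rw [pvIdentEnd]
      by_cases hp : pvIdentP cs[j] = true
      · simp only [h, dif_pos, hp, if_pos]
        rw [ih (j + 1) (by omega) (by omega), hdrop, List.takeWhile_cons, hp]
        simp
        omega
      · simp only [h, dif_pos, hp, if_neg, Bool.not_eq_true]
        rw [hdrop, List.takeWhile_cons]
        simp [hp]
    · rw [pvIdentEnd]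
      have : j = cs.length := by omega
      simp [this]

theorem pvLookup_getD (ps : List (String × String)) (key : List Char) :
    ∀ d : PySem.Dict (List Char) (List Char),
      (ps.foldl
        (fun d kv =>
          if d.contains (PySem.Chars.lower kv.1.toList) then d
          else d.insert (PySem.Chars.lower kv.1.toList) kv.2.toList) d).getD key [] =
        (match d.get? key with
          | some v => v
          | none => pvFindParam ps key) := by
  induction ps with
  | nil =>
    intro d
    simp only [List.foldl_nil, pvFindParam]
    rw [PySem.Dict.getD_eq_get?_getD]
    cases d.get? key <;> rfl
  | cons kv rest ih =>
    intro d
    obtain ⟨k, v⟩ := kv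
    simp only [List.foldl_cons]
    by_cases hc : d.contains (PySem.Chars.lower k.toList) = true
    · rw [if_pos hc, ih d]
      cases hg : d.get? key with
      | some w => rfl
      | none =>
        have hne : PySem.Chars.lower k.toList ≠ key := by
          intro heq
          rw [PySem.Dict.contains_eq_isSome_get?, heq, hg] at hc
          simp at hc
        simp [pvFindParam, hne]
    · rw [if_neg hc, ih]
      have hgd : d.get? key =
          (if key = PySem.Chars.lower k.toList then none else d.get? key) →
          True := fun _ => trivial
      rw [PySem.Dict.get?_insert]
      by_cases heq : key = PySem.Chars.lower k.toList
      · have hnone : d.get? key = none := by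
          rw [PySem.Dict.contains_eq_isSome_get?] at hc
          cases hg : d.get? key
          · rfl
          · rw [heq] at hg; rw [hg] at hc; simp at hc
        rw [if_pos heq, hnone]
        simp [pvFindParam, heq.symm]
      · rw [if_neg heq]
        cases hg : d.get? key with
        | some w => rfl
        | none =>
          have : PySem.Chars.lower k.toList ≠ key := fun h => heq h.symm
          simp [pvFindParam, this]

theorem pvDropTW {α : Type} (p : α → Bool) (l : List α) :
    l.drop (l.takeWhile p).length = l.dropWhile p := by
  have h := List.drop_left' (l₁ := l.takeWhile p) (l₂ := l.dropWhile p) rfl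
  rwa [List.takeWhile_append_dropWhile] at h

theorem pvMain (cs : List Char) (params : List (String × String)) :
    ∀ n i acc, cs.length - i ≤ n → i ≤ cs.length →
      pvLoopA cs params i acc = pvLoopB (pvBuildLookup params) (cs.drop i) acc := by
  intro n
  induction n with
  | zero =>
    intro i acc hn hi
    have : i = cs.length := by omega
    rw [pvLoopA, pvLoopB.eq_def]
    simp [this]
  | succ n ih =>
    intro i acc hn hi
    by_cases h : i < cs.length
    case neg =>
      have : i = cs.length := by omega
      rw [pvLoopA, pvLoopB.eq_def]
      simp [this]
    case pos =>
    have hdrop : cs.drop i = cs[i] :: cs.drop (i + 1) := List.drop_eq_getElem_cons h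
    rw [pvLoopA]
    simp only [h, dif_pos]
    by_cases h1 : (cs[i] == ' ' || cs[i] == '\t') = true
    · rw [if_pos h1, hdrop, pvLoopB.eq_def]
      rcases Bool.or_eq_true_iff.mp h1 with h' | h' <;>
        (have hch : _ := of_decide_eq_true h') <;>
        rw [hch] <;>
        simp only [show (' ' == '\'') = false by decide, show ('\t' == '\'') = false by decide,
          show (PySem.Chars.isalpha ' ' || ' ' == '_') = false by decide,
          show (PySem.Chars.isalpha '\t' || '\t' == '_') = false by decide] <;>
        simp only [Bool.false_eq_true, if_false, dif_neg, not_false_iff] <;>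
        exact ih (i + 1) acc (by omega) (by omega)
    · rw [if_neg h1]
      by_cases h2 : (cs[i] == '+') = true
      · have hch : cs[i] = '+' := of_decide_eq_true h2
        rw [if_pos h2, hdrop, pvLoopB.eq_def, hch]
        simp only [show ('+' == '\'') = false by decide,
          show (PySem.Chars.isalpha '+' || '+' == '_') = false by decide]
        simp only [Bool.false_eq_true, if_false, dif_neg, not_false_iff]
        exact ih (i + 1) acc (by omega) (by omega)
      · rw [if_neg h2]
        by_cases h3 : (cs[i] == '\'') = true
        · -- quote branch
          have hch : cs[i] = '\'' := of_decide_eq_true h3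
          rw [if_pos h3, hdrop, pvLoopB.eq_def, hch]
          simp only [beq_self_eq_true, if_pos]
          set tl := cs.drop (i + 1) with htl
          have hcast : ((i : Int) + 1) = ((i + 1 : Nat) : Int) := by push_cast; ring
          have hk : i + 1 ≤ cs.length := h
          have hff := PySem.Chars.findFrom_natCast cs ['\''] (i + 1) hk
          by_cases hf : (pvPartitionQuote tl).2.1 = true
          · obtain ⟨hsplit, hnb⟩ := pvPartition_found tl hf
            set b := (pvPartitionQuote tl).1 with hbdef
            set r2 := (pvPartitionQuote tl).2.2 with hrdef
            have hfind : PySem.Chars.find tl ['\''] = (b.length : Int) := by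
              have := pvFind_of_split b r2 hnb
              rw [← hsplit] at this
              exact this
            have hfne : PySem.Chars.find tl ['\''] ≠ -1 := by rw [hfind]; omega
            have he : PySem.Chars.findFrom cs ['\''] ((i : Int) + 1) =
                ((i + 1 + b.length : Nat) : Int) := by
              rw [hcast, hff, if_neg hfne, hfind]; push_cast; ring
            have hene : ¬ PySem.Chars.findFrom cs ['\''] ((i : Int) + 1) = -1 := by
              rw [he]; omega
            rw [dif_neg hene, if_pos hf]
            have htllen : tl.length = b.length + 1 + r2.length := by
              rw [hsplit]; simp; omega
            have htl2 : tl.length = cs.length - (i + 1) := by simp [htl]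
            have hslice : PySem.List.slice cs (some ((i : Int) + 1))
                (some (PySem.Chars.findFrom cs ['\''] ((i : Int) + 1))) = b := by
              rw [he, hcast]
              rw [show ((i + 1 + b.length : Nat) : Int) = ((i + 1 : Nat) : Int) + (b.length : Int)
                by push_cast; ring]
              rw [PySem.List.slice_natCast_add]
              rw [← htl, hsplit]
              exact List.take_left
            have hdrop2 : cs.drop ((PySem.Chars.findFrom cs ['\''] ((i : Int) + 1)).toNat + 1) = r2 := by
              rw [he]
              have : ((i + 1 + b.length : Nat) : Int).toNat = i + 1 + b.length := by omega
              rw [this]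
              rw [show i + 1 + b.length + 1 = (i + 1) + (b.length + 1) by ring]
              rw [← List.drop_drop, ← htl, hsplit]
              rw [show b ++ '\'' :: r2 = (b ++ ['\'']) ++ r2 by simp]
              exact List.drop_left' (by simp)
            rw [hslice, ← hdrop2]
            exact ih _ _ (by omega) (by omega)
          · have hf' : (pvPartitionQuote tl).2.1 = false := by
              cases hq : (pvPartitionQuote tl).2.1
              · rfl
              · exact absurd hq hf
            obtain ⟨hb, hnm, _⟩ := pvPartition_notfound tl hf'
            have hfind : PySem.Chars.find tl ['\''] = -1 := pvFind_of_not_mem tl hnm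
            have he : PySem.Chars.findFrom cs ['\''] ((i : Int) + 1) = -1 := by
              rw [hcast, hff, if_pos hfind]
            rw [dif_pos he, if_neg (by simp [hf'])]
            have hslice : PySem.List.slice cs (some ((i : Int) + 1)) none = tl := by
              rw [hcast, PySem.List.slice_from_natCast]
            rw [hslice, hb]
        · rw [if_neg h3]
          by_cases h4 : (PySem.Chars.isalpha cs[i] || cs[i] == '_') = true
          · -- identifier branch
            rw [dif_pos h4, hdrop, pvLoopB.eq_def]
            simp only [h3, Bool.false_eq_true, if_false]
            simp only [h4, dif_pos]
            rw [← hdrop]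
            have hp : pvIdentP cs[i] = true := pvIdentP_of_start _ h4
            rw [pvTWS_eq]
            simp only []
            have hj : pvIdentEnd cs i =
                i + ((cs.drop i).takeWhile pvIdentP).length :=
              pvIdentEnd_eq cs (cs.length - i) i (by omega) (by omega)
            have htwlen : 1 ≤ ((cs.drop i).takeWhile pvIdentP).length := by
              rw [hdrop, List.takeWhile_cons, hp]
              simp
            have htwle : ((cs.drop i).takeWhile pvIdentP).length ≤ cs.length - i := by
              have h1 := (List.takeWhile_prefix (l := cs.drop i) pvIdentP).length_le
              simp only [List.length_drop] at h1
              omega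
            have hslice : PySem.List.slice cs (some (i : Int))
                (some ((pvIdentEnd cs i : Nat) : Int)) =
                (cs.drop i).takeWhile pvIdentP := by
              rw [hj]
              rw [show ((i + ((cs.drop i).takeWhile pvIdentP).length : Nat) : Int) =
                ((i : Nat) : Int) + (((cs.drop i).takeWhile pvIdentP).length : Int)
                by push_cast; ring]
              rw [PySem.List.slice_natCast_add]
              exact (List.prefix_iff_eq_take.mp (List.takeWhile_prefix pvIdentP)).symm
            have hval : (pvBuildLookup params).getD
                (PySem.Chars.lower ((cs.drop i).takeWhile pvIdentP)) [] =
                pvFindParam params (PySem.Chars.lower ((cs.drop i).takeWhile pvIdentP)) := by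
              unfold pvBuildLookup
              rw [pvLookup_getD]
              simp [PySem.Dict.get?_empty]
            have hdropj : cs.drop (pvIdentEnd cs i) = (cs.drop i).dropWhile pvIdentP := by
              rw [hj, ← List.drop_drop]
              exact pvDropTW pvIdentP (cs.drop i)
            rw [hslice, hval, ← hdropj]
            exact ih _ _ (by omega) (by omega)
          · rw [dif_neg h4, hdrop, pvLoopB.eq_def]
            simp only [h3, h4, Bool.false_eq_true, if_false, dif_neg, not_false_iff]
            exact ih (i + 1) acc (by omega) (by omega)

-- ===== VERDICT (by name: the statement is the Claim_ definition above) =====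
theorem evaluate_altium_expression_py_spec : Claim_equal_evaluate_altium_expression_py := by
  intro expr params _
  unfold Spec_evaluate_altium_expression_py
  unfold evaluate_altium_expression_py evaluate_altium_expression_py_alt
  rw [pvMain expr.toList params expr.toList.length 0 [] (by omega) (by omega)]
  rfl
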